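-- pv_equiv track=rewrite | github.com/miliar/Code_Jam_Webscraper | solutions_python/Problem_155/261.py | exec_case
-- ===== SOURCE A (Python) =====
-- def exec_case(case):
--     smax, entries = case
--     #print smax, entries
--     tot = 0
--     tot_deficit = 0
--     add_to_deficit= 0
--     for i in range(1,len(entries)):
--         tot = tot + entries[i-1]
--         if entries[i]!=0:
--             if i > tot:
--                 add_to_deficit = i - tot
--                 tot_deficit = add_to_deficit + tot_deficit
--                 tot = tot + add_to_deficit
--         #print tot, entries[i], tot_deficit
--     #print tot_deficit
--     #print "--------------------"
--     return tot_deficit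
-- ===== SOURCE B (Python) =====
-- def exec_case(case):
--     smax, entries = case
--     n = len(entries)
--     # pass 1: pure prefix sums, prefix[i] = entries[0] + ... + entries[i-1]
--     prefix = [0]
--     for e in entries[:-1]:
--         prefix.append(prefix[-1] + e)
--     # pass 2: the answer is the largest per-checkpoint deficit i - prefix[i], floored at 0
--     best = 0
--     for i in range(1, n):
--         if entries[i] != 0:
--             best = max(best, i - prefix[i])
--     return best
-- ===== Notes on version B (the rewrite author's own statement) =====
-- stated objective: simpler
-- what changed: Replaces A's one-pass simulation with a self-referential accumulator (tot = prefix sum plus the deficit fed back into it, corrected by add_to_deficit each step) by two staged passes: first a pure prefix-sum table, then a running maximum of the per-checkpoint deficit i - prefix[i] floored at 0, which is the closed form of that feedback loop.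
import Mathlib
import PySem

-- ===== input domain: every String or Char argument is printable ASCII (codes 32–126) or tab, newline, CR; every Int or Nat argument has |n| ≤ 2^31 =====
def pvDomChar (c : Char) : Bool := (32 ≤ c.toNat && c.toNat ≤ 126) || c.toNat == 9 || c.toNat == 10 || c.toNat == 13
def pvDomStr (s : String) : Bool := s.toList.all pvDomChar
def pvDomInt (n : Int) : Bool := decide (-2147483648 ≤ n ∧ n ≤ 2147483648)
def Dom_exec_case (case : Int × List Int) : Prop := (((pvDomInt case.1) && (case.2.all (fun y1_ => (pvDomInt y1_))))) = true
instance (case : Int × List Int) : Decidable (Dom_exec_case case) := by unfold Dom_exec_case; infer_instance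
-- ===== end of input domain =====

-- B replaces A's one-pass deficit-feedback simulation by two staged passes: a pure
-- pfx-sum table, then a running maximum of the per-checkpoint deficit (simpler; same O(n)).
-- A never uses the first component (smax) of the case.

-- ===== PORT A =====
-- one iteration of A's loop body; state = (tot, tot_deficit)
def pvStepA (entries : List Int) (s : Int × Int) (i : Int) : Int × Int :=
  let tot := s.1 + PySem.List.pyGetD entries (i - 1) 0
  if PySem.List.pyGetD entries i 0 ≠ 0 then
    if i > tot then
      let add_to_deficit := i - tot
      (tot + add_to_deficit, add_to_deficit + s.2)
    else (tot, s.2)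
  else (tot, s.2)

def exec_case (case : Int × List Int) : Int :=
  ((PySem.List.pyRange 1 (PySem.List.len case.2) 1).foldl (pvStepA case.2) (0, 0)).2

-- ===== PORT B =====
-- pass 1 of Source B: pfx = [0]; for e in entries[:-1]: pfx.append(pfx[-1] + e)
-- (List.scanl (·+·) 0 is exactly that accumulation; List.dropLast is entries[:-1])
-- pass 2 of Source B: best = max(best, i - pfx[i]) at each i with entries[i] != 0
def pvBStep (entries pfx : List Int) (best : Int) (i : Int) : Int :=
  if PySem.List.pyGetD entries i 0 ≠ 0 then max best (i - PySem.List.pyGetD pfx i 0)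
  else best

def exec_case_alt (case : Int × List Int) : Int :=
  let pfx := List.scanl (· + ·) 0 case.2.dropLast
  (PySem.List.pyRange 1 (PySem.List.len case.2) 1).foldl (pvBStep case.2 pfx) 0

-- ===== PRECONDITION & SPEC =====
def Spec_exec_case (case : Int × List Int) (out : Int) : Prop := out = exec_case_alt case
instance (case : Int × List Int) (out : Int) : Decidable (Spec_exec_case case out) := by unfold Spec_exec_case; infer_instance

-- ===== CLAIM =====
def Claim_equal_exec_case : Prop := ∀ (case : Int × List Int), Dom_exec_case case → Spec_exec_case case (exec_case case)

-- ===== LEMMAS AND PROOFS =====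

-- proof-only intermediate: B's pass-2 step carried together with a running pfx sum
def pvStepM (entries : List Int) (s : Int × Int) (i : Int) : Int × Int :=
  let pre := s.1 + PySem.List.pyGetD entries (i - 1) 0
  if PySem.List.pyGetD entries i 0 ≠ 0 then (pre, max s.2 (i - pre))
  else (pre, s.2)

-- A's state is the merged state with the accumulated deficit folded into the first component.
theorem pv_fold_link (entries l : List Int) (p b : Int) :
    l.foldl (pvStepA entries) (p + b, b)
      = ((l.foldl (pvStepM entries) (p, b)).1 + (l.foldl (pvStepM entries) (p, b)).2,
         (l.foldl (pvStepM entries) (p, b)).2) := by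
  induction l generalizing p b with
  | nil => simp
  | cons i l ih =>
    simp only [List.foldl_cons]
    have hstep : pvStepA entries (p + b, b) i
        = ((pvStepM entries (p, b) i).1 + (pvStepM entries (p, b) i).2,
           (pvStepM entries (p, b) i).2) := by
      simp only [pvStepA, pvStepM]
      split_ifs with h1 h2 <;> simp_all <;> omega
    rw [hstep]
    exact ih _ _

-- getD on a scanl is the pfx sum
theorem pv_scanl_getD (xs : List Int) (a : Int) (k : Nat) (hk : k ≤ xs.length) :
    (List.scanl (· + ·) a xs).getD k 0 = a + (xs.take k).sum := by
  induction xs generalizing a k with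
  | nil =>
    cases k with
    | zero => simp [List.scanl_nil]
    | succ k => simp at hk
  | cons x xs ih =>
    cases k with
    | zero => simp [List.scanl_cons]
    | succ k =>
      simp only [List.scanl_cons, List.getD_cons_succ, List.take_succ_cons, List.sum_cons]
      rw [ih (a + x) k (by simpa using hk)]
      ring

-- the merged fold's second component is B's pass-2 fold, given the pfx-sum invariant
theorem pv_snd (entries : List Int) (pfx : List Int)
    (hpre : pfx = List.scanl (· + ·) 0 entries.dropLast) :
    ∀ (m : Nat) (k b : Int), k = (entries.length : Int) - m → 1 ≤ k →
      ((PySem.List.pyRange k (entries.length : Int) 1).foldl (pvStepM entries)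
          ((entries.take (k - 1).toNat).sum, b)).2
        = (PySem.List.pyRange k (entries.length : Int) 1).foldl (pvBStep entries pfx) b := by
  intro m
  induction m with
  | zero =>
    intro k b hk _
    rw [PySem.List.pyRange_one_eq_nil (by omega)]
    simp
  | succ m ih =>
    intro k b hk hk1
    have hklt : k < (entries.length : Int) := by omega
    rw [PySem.List.pyRange_one_cons hklt]
    simp only [List.foldl_cons]
    -- the entry read at index k-1 and the pfx sums
    have hknat : ((k - 1).toNat : Int) = k - 1 := by omega
    have hlt : (k - 1).toNat < entries.length := by omega
    have hget : PySem.List.pyGetD entries (k - 1) 0 = entries[(k - 1).toNat] := by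
      rw [PySem.List.pyGetD_eq_getElem (xs := entries) (i := k - 1) (d := 0) (by omega)
        (by simp; omega)]
    have hsum : (entries.take (k - 1).toNat).sum + entries[(k - 1).toNat]
        = (entries.take k.toNat).sum := by
      have hkk : k.toNat = (k - 1).toNat + 1 := by omega
      rw [hkk, List.take_add_one, List.sum_append]
      rw [List.getElem?_eq_getElem (by omega)]
      simp
    -- the pfx table read at index k
    have hprefk : PySem.List.pyGetD pfx k 0 = (entries.take k.toNat).sum := by
      have hk' : ((k.toNat : Nat) : Int) = k := by omega
      rw [← hk', PySem.List.pyGetD_natCast, hpre]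
      rw [pv_scanl_getD _ 0 k.toNat (by rw [List.length_dropLast]; omega)]
      rw [List.dropLast_eq_take, List.take_take]
      have : min k.toNat (entries.length - 1) = k.toNat := by omega
      rw [this, Int.zero_add]
      rw [Int.toNat_natCast]
    -- one step on each side
    have hstep : pvStepM entries ((entries.take (k - 1).toNat).sum, b) k
        = ((entries.take k.toNat).sum,
           if PySem.List.pyGetD entries k 0 ≠ 0 then max b (k - (entries.take k.toNat).sum) else b) := by
      simp only [pvStepM, hget, hsum]
      split_ifs <;> rfl
    rw [hstep]
    have hbstep : pvBStep entries pfx b k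
        = if PySem.List.pyGetD entries k 0 ≠ 0 then max b (k - (entries.take k.toNat).sum) else b := by
      simp only [pvBStep, hprefk]
    rw [← hbstep]
    have hnext : (entries.take (k + 1 - 1).toNat).sum = (entries.take k.toNat).sum := by norm_num
    have := ih (k + 1) (pvBStep entries pfx b k) (by omega) (by omega)
    rw [hnext] at this
    exact this

-- ===== VERDICT =====
theorem exec_case_spec : Claim_equal_exec_case := by
  intro case _
  show exec_case case = exec_case_alt case
  unfold exec_case exec_case_alt
  set entries := case.2 with hent
  have hlink := pv_fold_link entries (PySem.List.pyRange 1 (PySem.List.len entries) 1) 0 0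
  simp only [Int.add_zero] at hlink
  rw [hlink]
  by_cases hlen : 1 ≤ (entries.length : Int)
  · have h1 : (1 : Int) = (entries.length : Int) - ((entries.length - 1 : Nat) : Int) := by omega
    have := pv_snd entries (List.scanl (· + ·) 0 entries.dropLast) rfl
      (entries.length - 1) 1 0 (by omega) (by omega)
    simpa [PySem.List.len] using this
  · rw [PySem.List.pyRange_one_eq_nil (by simp only [PySem.List.len]; omega)]
    simp
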